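-- pv_equiv track=rewrite | github.com/chinapnr/How-to-Python-and-Machine-Learning-book-code | code/ch25_身份证汉字和数字识别/front_all/number_recognition/TextLine_Index.py | rearrange_text
-- ===== SOURCE A (Python) =====
-- def rearrange_text(chain):
--     newchain = []
--     index = {}
--     for i, point in enumerate(chain):
--         index[point[0]] = i
--     new_index = sorted(index.keys())
--     for i in new_index:
--         newchain.append(chain[index[i]])
--     return newchain
-- ===== SOURCE B (Python) =====
-- def rearrange_text(chain):
--     # Stable-sort the chain by first coordinate, then collapse each equal-key
--     # run in one adjacent-pair scan, keeping the last element of the run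
--     # (stability makes that the last occurrence of the key in chain).
--     s = sorted(chain, key=lambda p: p[0])
--     out = []
--     for p, q in zip(s, s[1:]):
--         if p[0] != q[0]:
--             out.append(p)
--     if s:
--         out.append(s[-1])
--     return out
-- ===== Notes on version B (the rewrite author's own statement) =====
-- stated objective: alternative
-- what changed: B builds no key index at all: instead of A's dict of key->last position plus re-indexing chain by sorted keys, B stable-sorts the chain itself by first coordinate and collapses equal-key runs in one adjacent-pair scan, keeping the last element of each run (stability makes it the last occurrence).
import Mathlib
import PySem

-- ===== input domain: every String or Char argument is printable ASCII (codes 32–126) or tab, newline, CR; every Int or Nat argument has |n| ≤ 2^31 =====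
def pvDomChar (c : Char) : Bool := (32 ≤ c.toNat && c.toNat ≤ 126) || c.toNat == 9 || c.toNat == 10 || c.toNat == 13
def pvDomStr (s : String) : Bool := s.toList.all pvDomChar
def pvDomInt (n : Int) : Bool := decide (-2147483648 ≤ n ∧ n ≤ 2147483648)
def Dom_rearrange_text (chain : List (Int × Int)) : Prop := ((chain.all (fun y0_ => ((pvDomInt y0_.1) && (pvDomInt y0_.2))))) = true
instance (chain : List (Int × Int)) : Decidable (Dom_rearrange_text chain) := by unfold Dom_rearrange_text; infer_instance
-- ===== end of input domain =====

-- B builds no key index: it stable-sorts the chain by first coordinate and collapses each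
-- equal-key run in one adjacent-pair scan, keeping the run's last element (the last occurrence).


-- ===== PORT A =====
-- A-side helper: the dict 'index' built by A's first loop (index[point[0]] = i)
def pvIndexA (chain : List (Int × Int)) : PySem.Dict Int Int :=
  (PySem.List.enumerate chain).foldl (fun d ip => d.insert ip.2.1 ip.1) PySem.Dict.empty

-- Port of A. In 'chain[index[i]]' both the dict lookup and the indexing always succeed in
-- Python (i ranges over index's own keys and every stored value is a valid index), so the
-- getD defaults below are never reached — the port is exact.
def rearrange_text (chain : List (Int × Int)) : List (Int × Int) :=
  (PySem.List.sorted (pvIndexA chain).keys (fun x => x)).foldl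
    (fun newchain i => newchain ++ [(PySem.List.pyGet? chain ((pvIndexA chain).getD i 0)).getD (0, 0)]) []

-- ===== PORT B =====
-- Port of B: stable sort by first coordinate, then one adjacent-pair scan over
-- zip(s, s[1:]) keeping p when the next key differs, finally 'if s: out.append(s[-1])'.
-- s[-1] is guarded by 's ≠ []' in the Python, so the getD default is never reached.
def rearrange_text_alt (chain : List (Int × Int)) : List (Int × Int) :=
  let s := PySem.List.sorted chain (fun p => p.1)
  let out := (s.zip (s.drop 1)).foldl
    (fun out pq => if pq.1.1 ≠ pq.2.1 then out ++ [pq.1] else out) []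
  if s = [] then out else out ++ [(PySem.List.pyGet? s (-1)).getD (0, 0)]

-- ===== PRECONDITION & SPEC =====
def Spec_rearrange_text (chain : List (Int × Int)) (out : List (Int × Int)) : Prop := out = rearrange_text_alt chain
instance (chain : List (Int × Int)) (out : List (Int × Int)) : Decidable (Spec_rearrange_text chain out) := by unfold Spec_rearrange_text; infer_instance

-- ===== CLAIM (what is proved, stated in full; the proofs are below) =====
def Claim_equal_rearrange_text : Prop := ∀ (chain : List (Int × Int)), Dom_rearrange_text chain → Spec_rearrange_text chain (rearrange_text chain)

-- ===== LEMMAS AND PROOFS =====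

-- the last pair with first coordinate k, read off r = chain.reverse
def pvLast (r : List (Int × Int)) (k : Int) : Int × Int :=
  (r.find? (fun q => q.1 == k)).getD (0, 0)

-- ===== A-side characterization =====

lemma pvIndexA_append (xs : List (Int × Int)) (x : Int × Int) :
    pvIndexA (xs ++ [x]) = (pvIndexA xs).insert x.1 (xs.length : Int) := by
  simp [pvIndexA, PySem.List.enumerate_append, PySem.List.enumerate_cons,
    PySem.List.enumerate_nil, List.foldl_append]

lemma pvA_lookup : ∀ (chain : List (Int × Int)) (k i : Int),
    (pvIndexA chain).get? k = some i →
    0 ≤ i ∧ i < (chain.length : Int) ∧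
    PySem.List.pyGet? chain i = some (pvLast chain.reverse k) ∧
    (pvLast chain.reverse k).1 = k := by
  intro chain
  induction chain using List.reverseRecOn with
  | nil =>
    intro k i h
    simp [pvIndexA, PySem.List.enumerate_nil, PySem.Dict.get?_empty] at h
  | append_singleton xs x ih =>
    intro k i h
    rw [pvIndexA_append] at h
    by_cases hk : k = x.1
    · subst hk
      rw [PySem.Dict.get?_insert_self] at h
      injection h with h'
      subst h'
      refine ⟨Int.natCast_nonneg _, ?_, ?_, ?_⟩
      · simp only [List.length_append, List.length_singleton]; push_cast; omega
      · have h2 : pvLast ((xs ++ [x]).reverse) x.1 = x := by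
          simp only [pvLast, List.reverse_append, List.reverse_singleton, List.singleton_append]
          rw [List.find?_cons_of_pos (by simp)]
          rfl
        rw [h2, PySem.List.pyGet?_natCast]
        simp
      · simp only [pvLast, List.reverse_append, List.reverse_singleton, List.singleton_append]
        rw [List.find?_cons_of_pos (by simp)]
        rfl
    · rw [PySem.Dict.get?_insert_of_ne _ _ hk] at h
      obtain ⟨h0, hlt, hget, hfst⟩ := ih k i h
      have hne : x.1 ≠ k := fun e => hk e.symm
      have hx1k : (x.1 == k) = false := beq_eq_false_iff_ne.2 hne
      have hlast : pvLast ((xs ++ [x]).reverse) k = pvLast xs.reverse k := by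
        simp only [pvLast, List.reverse_append, List.reverse_singleton, List.singleton_append]
        rw [List.find?_cons_of_neg (by simp [hx1k])]
      refine ⟨h0, ?_, ?_, ?_⟩
      · simp only [List.length_append, List.length_singleton]; push_cast; omega
      · lift i to Nat using h0 with n
        rw [PySem.List.pyGet?_natCast] at hget ⊢
        rw [hlast, List.getElem?_append_left (by exact_mod_cast hlt)]
        exact hget
      · rw [hlast]; exact hfst

lemma pvEnumMapFst (chain : List (Int × Int)) :
    (PySem.List.enumerate chain).map (fun ip => ip.2.1) = chain.map Prod.fst := by
  rw [show (fun ip : Int × Int × Int => ip.2.1) = (Prod.fst ∘ Prod.snd) from rfl, ← List.map_map]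
  rw [PySem.List.map_snd_enumerate]

lemma pvKeysA (chain : List (Int × Int)) :
    (pvIndexA chain).keys = PySem.Set.ofList (chain.map Prod.fst) := by
  have h := PySem.Dict.keys_foldl_insert_key (l := PySem.List.enumerate chain)
      (key := fun ip : Int × Int × Int => ip.2.1) (f := fun _ ip => ip.1)
      (d := (PySem.Dict.empty : PySem.Dict Int Int))
  unfold pvIndexA
  refine Eq.trans h ?_
  rw [pvEnumMapFst, PySem.Dict.keys_empty, PySem.Set.ofList_eq_foldl]
  simp [PySem.Set.update]

lemma pvKeys_get? (chain : List (Int × Int)) (k : Int) (hk : k ∈ (pvIndexA chain).keys) :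
    ∃ i, (pvIndexA chain).get? k = some i := by
  cases hcase : (pvIndexA chain).get? k with
  | some i => exact ⟨i, rfl⟩
  | none => exact absurd hk ((PySem.Dict.get?_eq_none_iff_not_mem_keys _ _).1 hcase)

lemma pvLast_fst (chain : List (Int × Int)) (k : Int) (hk : k ∈ chain.map Prod.fst) :
    (pvLast chain.reverse k).1 = k := by
  have hk2 : k ∈ (pvIndexA chain).keys := by
    rw [pvKeysA]; exact (PySem.Set.mem_ofList _ _).2 hk
  obtain ⟨i, hi⟩ := pvKeys_get? chain k hk2
  exact (pvA_lookup chain k i hi).2.2.2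

lemma pvA_eq (chain : List (Int × Int)) :
    rearrange_text chain =
      (PySem.List.sorted (PySem.Set.ofList (chain.map Prod.fst)) (fun x => x)).map
        (fun k => pvLast chain.reverse k) := by
  unfold rearrange_text
  rw [PySem.List.foldl_append_singleton_eq_map, pvKeysA]
  simp only [List.nil_append]
  apply List.map_congr_left
  intro k hk
  have hmem : k ∈ PySem.Set.ofList (chain.map Prod.fst) := by
    rwa [PySem.List.mem_sorted] at hk
  have hk2 : k ∈ (pvIndexA chain).keys := by rw [pvKeysA]; exact hmem
  obtain ⟨i, hi⟩ := pvKeys_get? chain k hk2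
  obtain ⟨-, -, hget, -⟩ := pvA_lookup chain k i hi
  rw [PySem.Dict.getD_of_get?_eq_some _ 0 hi, hget]
  rfl

lemma pvA_pairwise (chain : List (Int × Int)) :
    (rearrange_text chain).Pairwise (fun a b => a.1 < b.1) := by
  rw [pvA_eq, List.pairwise_map]
  have hp := PySem.List.sorted_ofList_pairwise_lt (chain.map Prod.fst)
  refine List.Pairwise.imp_of_mem ?_ hp
  intro a b ha hb hlt
  have ha2 : a ∈ chain.map Prod.fst := by
    rwa [PySem.List.mem_sorted, PySem.Set.mem_ofList] at ha
  have hb2 : b ∈ chain.map Prod.fst := by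
    rwa [PySem.List.mem_sorted, PySem.Set.mem_ofList] at hb
  rw [pvLast_fst chain a ha2, pvLast_fst chain b hb2]
  exact hlt

lemma pvA_mem (chain : List (Int × Int)) (p : Int × Int) :
    p ∈ rearrange_text chain ↔ chain.reverse.find? (fun q => q.1 == p.1) = some p := by
  rw [pvA_eq]
  constructor
  · intro hp
    obtain ⟨k, hk, hpk⟩ := List.mem_map.1 hp
    have hkk : k ∈ chain.map Prod.fst := by
      rwa [PySem.List.mem_sorted, PySem.Set.mem_ofList] at hk
    have hfst : p.1 = k := by rw [← hpk]; exact pvLast_fst chain k hkk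
    obtain ⟨q, hq, hqk⟩ := List.mem_map.1 hkk
    cases hfind : chain.reverse.find? (fun x => x.1 == k) with
    | none =>
      have := List.find?_eq_none.1 hfind q (List.mem_reverse.2 hq)
      simp [hqk] at this
    | some r =>
      have : pvLast chain.reverse k = r := by simp [pvLast, hfind]
      rw [hfst, hfind, ← hpk, this]
  · intro hfind
    have hpmem : p ∈ chain := List.mem_reverse.1 (List.mem_of_find?_eq_some hfind)
    have hkk : p.1 ∈ chain.map Prod.fst := List.mem_map.2 ⟨p, hpmem, rfl⟩
    refine List.mem_map.2 ⟨p.1, ?_, ?_⟩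
    · rw [PySem.List.mem_sorted, PySem.Set.mem_ofList]; exact hkk
    · simp [pvLast, hfind]

-- ===== B-side characterization =====

-- collapse equal-first-coordinate runs, keeping the last element of each run
def pvCollapse : List (Int × Int) → List (Int × Int)
  | [] => []
  | [p] => [p]
  | p :: q :: t => if p.1 ≠ q.1 then p :: pvCollapse (q :: t) else pvCollapse (q :: t)

lemma pvGet_cons_neg_one (p q : Int × Int) (t : List (Int × Int)) :
    PySem.List.pyGet? (p :: q :: t) (-1) = PySem.List.pyGet? (q :: t) (-1) := by
  simp [PySem.List.pyGet?, PySem.List.pyIdx?]; rfl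

lemma pvAlt_eq_collapse (chain : List (Int × Int)) :
    rearrange_text_alt chain = pvCollapse (PySem.List.sorted chain (fun p => p.1)) := by
  show (if _ = ([] : List (Int × Int)) then _ else _) = _
  rw [PySem.List.foldl_append_ite (p := fun pq : (Int × Int) × (Int × Int) => pq.1.1 ≠ pq.2.1)
    (f := fun pq => pq.1)]
  simp only [List.nil_append]
  generalize PySem.List.sorted chain (fun p => p.1) = s
  induction s using pvCollapse.induct with
  | case1 => simp [pvCollapse]
  | case2 p => simp [pvCollapse, PySem.List.pyGet?, PySem.List.pyIdx?]
  | case3 p q t hne ih =>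
    have hz : ((p :: q :: t).zip ((p :: q :: t).drop 1))
        = (p, q) :: ((q :: t).zip ((q :: t).drop 1)) := by
      simp [List.zip]
    rw [hz, if_neg (by simp), pvGet_cons_neg_one]
    rw [List.filter_cons_of_pos (by simpa using hne), List.map_cons]
    rw [if_neg (by simp)] at ih
    simp only [pvCollapse, if_pos hne]
    rw [← ih]
    cases t <;> simp
  | case4 p q t heq ih =>
    have hz : ((p :: q :: t).zip ((p :: q :: t).drop 1))
        = (p, q) :: ((q :: t).zip ((q :: t).drop 1)) := by
      simp [List.zip]
    rw [hz, if_neg (by simp), pvGet_cons_neg_one]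
    rw [List.filter_cons_of_neg (by simpa using heq)]
    rw [if_neg (by simp)] at ih
    simp only [pvCollapse, if_neg heq]
    exact ih

-- elements of the collapse come from the list
lemma pvCollapse_subset : ∀ (s : List (Int × Int)) (p : Int × Int), p ∈ pvCollapse s → p ∈ s := by
  intro s
  induction s using pvCollapse.induct with
  | case1 => intro p hp; simp [pvCollapse] at hp
  | case2 q => intro p hp; simpa [pvCollapse] using hp
  | case3 q r t hne ih =>
    intro p hp
    simp only [pvCollapse, if_pos hne] at hp
    rcases List.mem_cons.1 hp with rfl | hp'
    · exact List.mem_cons_self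
    · exact List.mem_cons_of_mem _ (ih p hp')
  | case4 q r t heq ih =>
    intro p hp
    simp only [pvCollapse, if_neg heq] at hp
    exact List.mem_cons_of_mem _ (ih p hp)

lemma pvCollapse_mem : ∀ (s : List (Int × Int)),
    s.Pairwise (fun a b => a.1 ≤ b.1) → ∀ (p : Int × Int),
    (p ∈ pvCollapse s ↔ s.reverse.find? (fun q => q.1 == p.1) = some p) := by
  intro s
  induction s using pvCollapse.induct with
  | case1 => intro _ p; simp [pvCollapse]
  | case2 q =>
    intro _ p
    by_cases h : q.1 = p.1
    · simp only [pvCollapse, List.mem_singleton, List.reverse_singleton]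
      rw [List.find?_cons_of_pos (by simpa using h)]
      simp only [Option.some.injEq]
      exact eq_comm
    · simp only [pvCollapse, List.mem_singleton, List.reverse_singleton]
      rw [List.find?_cons_of_neg (by simpa using h)]
      simp only [List.find?_nil]
      constructor
      · intro e; subst e; exact absurd rfl h
      · intro e; exact absurd e (by simp)
  | case3 q r t hne ih =>
    intro hs p
    have hs' := hs.tail
    have hqr : q.1 < r.1 := lt_of_le_of_ne (List.rel_of_pairwise_cons hs List.mem_cons_self) hne
    have hkey : ∀ b ∈ r :: t, q.1 < b.1 := by
      intro b hb
      rcases List.mem_cons.1 hb with rfl | hb'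
      · exact hqr
      · exact lt_of_lt_of_le hqr (List.rel_of_pairwise_cons hs' hb')
    have hrev : (q :: r :: t).reverse = (r :: t).reverse ++ [q] := by simp
    rw [hrev]
    simp only [pvCollapse, if_pos hne, List.mem_cons, List.find?_append]
    by_cases hp : p.1 = q.1
    · have hnone : (r :: t).reverse.find? (fun x => x.1 == p.1) = none := by
        rw [List.find?_eq_none]
        intro b hb
        have := hkey b (List.mem_reverse.1 hb)
        simp only [beq_iff_eq]
        omega
      rw [hnone, Option.none_or, List.find?_cons_of_pos (by simpa using hp.symm)]
      constructor
      · rintro (rfl | hmem)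
        · rfl
        · have hb := pvCollapse_subset _ _ hmem
          have := hkey p hb
          omega
      · intro e; injection e with e'; exact Or.inl e'.symm
    · have hnone : [q].find? (fun x => x.1 == p.1) = none := by
        rw [List.find?_eq_none]
        intro b hb
        simp only [List.mem_singleton] at hb
        subst hb
        simp only [beq_iff_eq]
        omega
      rw [hnone, Option.or_none, ← ih hs' p]
      constructor
      · rintro (rfl | hmem)
        · exact absurd rfl hp
        · exact hmem
      · exact Or.inr
  | case4 q r t heq ih =>
    intro hs p
    have hs' := hs.tail
    have heq' : q.1 = r.1 := by by_contra h; exact heq h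
    have hrev : (q :: r :: t).reverse = (r :: t).reverse ++ [q] := by simp
    rw [hrev]
    simp only [pvCollapse, if_neg heq, List.find?_append]
    by_cases hp : p.1 = q.1
    · have hsome : ((r :: t).reverse.find? (fun x => x.1 == p.1)).isSome := by
        rw [List.find?_isSome]
        refine ⟨r, List.mem_reverse.2 List.mem_cons_self, ?_⟩
        simp only [beq_iff_eq]
        omega
      obtain ⟨v, hv⟩ := Option.isSome_iff_exists.1 hsome
      rw [ih hs' p, hv]
      simp [Option.or]
    · have hnone : [q].find? (fun x => x.1 == p.1) = none := by
        rw [List.find?_eq_none]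
        intro b hb
        simp only [List.mem_singleton] at hb
        subst hb
        simp only [beq_iff_eq]
        omega
      rw [hnone, Option.or_none]
      exact ih hs' p

lemma pvCollapse_pairwise : ∀ (s : List (Int × Int)),
    s.Pairwise (fun a b => a.1 ≤ b.1) → (pvCollapse s).Pairwise (fun a b => a.1 < b.1) := by
  intro s
  induction s using pvCollapse.induct with
  | case1 => intro _; simp [pvCollapse]
  | case2 q => intro _; simp [pvCollapse]
  | case3 q r t hne ih =>
    intro hs
    have hs' := hs.tail
    have hqr : q.1 < r.1 := lt_of_le_of_ne (List.rel_of_pairwise_cons hs List.mem_cons_self) hne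
    simp only [pvCollapse, if_pos hne]
    refine List.Pairwise.cons ?_ (ih hs')
    intro b hb
    have hbmem := pvCollapse_subset _ _ hb
    rcases List.mem_cons.1 hbmem with rfl | hb'
    · exact hqr
    · exact lt_of_lt_of_le hqr (List.rel_of_pairwise_cons hs' hb')
  | case4 q r t heq ih =>
    intro hs
    simp only [pvCollapse, if_neg heq]
    exact ih hs.tail

-- stability of the sort: the sublist of pairs with a fixed first coordinate is unchanged
lemma pvFilter_insertBy : ∀ (l : List (Int × Int)) (x : Int × Int) (k : Int),
    l.Pairwise (fun a b => a.1 ≤ b.1) →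
    (PySem.List.insertBy (fun a b => decide (a.1 < b.1)) x l).filter (fun y => y.1 == k)
      = if x.1 == k then l.filter (fun y => y.1 == k) ++ [x]
        else l.filter (fun y => y.1 == k) := by
  intro l
  induction l with
  | nil =>
    intro x k _
    simp only [PySem.List.insertBy, List.filter_nil]
    by_cases h : x.1 = k <;> simp [h]
  | cons y ys ih =>
    intro x k hs
    have hs' := hs.tail
    simp only [PySem.List.insertBy]
    by_cases hlt : x.1 < y.1
    · rw [if_pos (by simpa using hlt)]
      by_cases hk : x.1 = k
      · have hnil : (y :: ys).filter (fun z => z.1 == k) = [] := by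
          rw [List.filter_eq_nil_iff]
          intro b hb
          have hyb : y.1 ≤ b.1 := by
            rcases List.mem_cons.1 hb with rfl | hb'
            · exact le_refl _
            · exact List.rel_of_pairwise_cons hs hb'
          simp only [beq_iff_eq]
          omega
        rw [if_pos (by simpa using hk), hnil, List.filter_cons_of_pos (by simpa using hk), hnil]
        simp
      · rw [if_neg (by simpa using hk), List.filter_cons_of_neg (by simpa using hk)]
    · rw [if_neg (by simpa using hlt), List.filter_cons, List.filter_cons, ih x k hs']
      by_cases hk : x.1 = k <;> by_cases hy : y.1 = k <;>
        simp [hk, hy]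

lemma pvSorted_filter (chain : List (Int × Int)) (k : Int) :
    (PySem.List.sorted chain (fun p => p.1)).filter (fun x => x.1 == k)
      = chain.filter (fun x => x.1 == k) := by
  induction chain using List.reverseRecOn with
  | nil => simp [PySem.List.sorted_eq_foldl_insertBy]
  | append_singleton xs x ih =>
    have hstep : PySem.List.sorted (xs ++ [x]) (fun p : Int × Int => p.1)
        = PySem.List.insertBy (fun a b => decide (a.1 < b.1)) x
            (PySem.List.sorted xs (fun p : Int × Int => p.1)) := by
      rw [PySem.List.sorted_eq_foldl_insertBy, PySem.List.sorted_eq_foldl_insertBy,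
        List.foldl_append]
      rfl
    rw [hstep, pvFilter_insertBy _ _ _ (PySem.List.sorted_pairwise xs (fun p => p.1)),
      List.filter_append, List.filter_cons, List.filter_nil, ih]
    by_cases hk : x.1 = k <;> simp [hk]

lemma pvFind_sorted (chain : List (Int × Int)) (k : Int) :
    (PySem.List.sorted chain (fun p => p.1)).reverse.find? (fun q => q.1 == k)
      = chain.reverse.find? (fun q => q.1 == k) := by
  rw [← List.head?_filter, ← List.head?_filter, List.filter_reverse, List.filter_reverse,
    pvSorted_filter]

lemma pv_eq_of_perm_strict (l₁ l₂ : List (Int × Int)) (hp : l₁.Perm l₂)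
    (h₁ : l₁.Pairwise (fun a b => a.1 < b.1)) (h₂ : l₂.Pairwise (fun a b => a.1 < b.1)) :
    l₁ = l₂ :=
  List.Perm.eq_of_pairwise
    (fun _ _ _ _ hab hba => absurd (lt_trans hab hba) (lt_irrefl _)) h₁ h₂ hp

lemma pvNodup_of_pairwise (l : List (Int × Int)) (h : l.Pairwise (fun a b => a.1 < b.1)) :
    l.Nodup :=
  h.imp (fun hab => fun e => by rw [e] at hab; exact lt_irrefl _ hab)

lemma pvMain (chain : List (Int × Int)) : rearrange_text chain = rearrange_text_alt chain := by
  have hsp : (PySem.List.sorted chain (fun p : Int × Int => p.1)).Pairwise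
      (fun a b => a.1 ≤ b.1) := PySem.List.sorted_pairwise chain (fun p => p.1)
  have hBpw : (rearrange_text_alt chain).Pairwise (fun a b => a.1 < b.1) := by
    rw [pvAlt_eq_collapse]; exact pvCollapse_pairwise _ hsp
  have hApw := pvA_pairwise chain
  refine pv_eq_of_perm_strict _ _ ?_ hApw hBpw
  rw [List.perm_ext_iff_of_nodup (pvNodup_of_pairwise _ hApw) (pvNodup_of_pairwise _ hBpw)]
  intro p
  rw [pvA_mem, pvAlt_eq_collapse, pvCollapse_mem _ hsp p, pvFind_sorted]

-- ===== VERDICT (by name: the statement is the Claim_ definition above) =====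
theorem rearrange_text_spec : Claim_equal_rearrange_text := by
  intro chain _
  show rearrange_text chain = rearrange_text_alt chain
  exact pvMain chain
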